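-- pv_equiv track=rewrite | github.com/ninepig/leecode_dd_2024 | zmianjing/dd/ddIntervewviewAnotherRound/searchSuggestionSystem.py | searchByPrefix
-- ===== SOURCE A (Python) =====
-- def searchByPrefix(prefix, products):
--     index = 0
--     for idx,name in enumerate(products):
--         if prefix == name[:len(prefix)]:
--             index = idx
--             break
--     res = []
--     for i in range(index,min(index + 3, len(products))): ## either 3 after idx or end of target
--         if prefix == products[i][:len(prefix)] : ##double confirm has same prefix to avoid problem
--             res.append(products[i])
--
--     return res
-- ===== SOURCE B (Python) =====
-- def searchByPrefix(prefix, products):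
--     matches = [(i, p) for i, p in enumerate(products) if p.startswith(prefix)]
--     if not matches:
--         return []
--     bound = matches[0][0] + 3
--     res = []
--     for i, p in matches:
--         if i >= bound:
--             break
--         res.append(p)
--     return res
-- ===== Notes on version B (the rewrite author's own statement) =====
-- stated objective: alternative
-- what changed: B builds the full index-annotated list of prefix matches in one filtering pass and then take-whiles it below first_match_index+3, instead of A's find-first-index loop followed by a bounded index-range re-scan with repeated slice comparisons.
import Mathlib
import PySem

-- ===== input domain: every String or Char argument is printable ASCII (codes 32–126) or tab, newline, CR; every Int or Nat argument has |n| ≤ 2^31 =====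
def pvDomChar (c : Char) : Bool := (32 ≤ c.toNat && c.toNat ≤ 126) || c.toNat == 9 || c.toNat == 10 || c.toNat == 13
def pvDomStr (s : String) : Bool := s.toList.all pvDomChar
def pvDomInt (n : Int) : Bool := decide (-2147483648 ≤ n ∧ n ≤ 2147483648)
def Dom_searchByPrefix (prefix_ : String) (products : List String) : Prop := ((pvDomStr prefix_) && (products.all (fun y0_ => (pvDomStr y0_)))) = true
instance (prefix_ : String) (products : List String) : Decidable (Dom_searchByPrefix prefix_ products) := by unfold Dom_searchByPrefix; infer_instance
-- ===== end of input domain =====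

-- B builds the full index-annotated match list in one filtering pass and then take-whiles it
-- below first_match_index+3, instead of A's find-first loop plus index-range re-scan;
-- objective: alternative. A and B are proved to return the same list.


-- ===== PORT A =====
-- Python's enumerate(products), ported by hand (exact: pairs (index, element) from index i)
def pvEnum {α : Type} (i : Nat) : List α → List (Nat × α)
  | [] => []
  | x :: xs => (i, x) :: pvEnum (i + 1) xs

-- A's first loop: 'index = 0; for idx,name in enumerate(products): if prefix == name[:len(prefix)]: index = idx; break'
def pvAFind (prefix_ : String) : List (Nat × String) → Int
  | [] => 0
  | (idx, name) :: rest =>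
      if prefix_ == PySem.Str.slice name none (some (PySem.Str.len prefix_)) then (idx : Int)
      else pvAFind prefix_ rest

def searchByPrefix (prefix_ : String) (products : List String) : List String :=
  let index := pvAFind prefix_ (pvEnum 0 products)
  (PySem.List.pyRange index (min (index + 3) (products.length : Int))).foldl
    (fun res i =>
      if prefix_ == PySem.Str.slice (PySem.List.pyGetD products i "") none (some (PySem.Str.len prefix_)) then
        res ++ [PySem.List.pyGetD products i ""]
      else res) []

-- ===== PORT B =====
-- B's final loop: 'for i, p in matches: if i >= bound: break; res.append(p)'
def pvBOut (bound : Nat) : List (Nat × String) → List String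
  | [] => []
  | (i, p) :: rest => if bound ≤ i then [] else p :: pvBOut bound rest

-- B: 'matches = [(i,p) for i,p in enumerate(products) if p.startswith(prefix)];
--     if not matches: return []; bound = matches[0][0] + 3; <loop above>'
def searchByPrefix_alt (prefix_ : String) (products : List String) : List String :=
  let ms0 := (pvEnum 0 products).filter (fun ip => PySem.Str.startswith ip.2 prefix_)
  match ms0 with
  | [] => []
  | (j0, p0) :: ms => pvBOut (j0 + 3) ((j0, p0) :: ms)

-- ===== PRECONDITION & SPEC =====
def Spec_searchByPrefix (prefix_ : String) (products : List String) (out : List String) : Prop := out = searchByPrefix_alt prefix_ products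
instance (prefix_ : String) (products : List String) (out : List String) : Decidable (Spec_searchByPrefix prefix_ products out) := by unfold Spec_searchByPrefix; infer_instance

-- ===== CLAIM (what is proved, stated in full; the proofs are below) =====
def Claim_equal_searchByPrefix : Prop := ∀ (prefix_ : String) (products : List String), Dom_searchByPrefix prefix_ products → Spec_searchByPrefix prefix_ products (searchByPrefix prefix_ products)

-- ===== LEMMAS AND PROOFS =====

-- B's dispatch on the match list, named so the proofs can recurse over the tail
def pvBDispatch : List (Nat × String) → List String
  | [] => []
  | (j0, p0) :: ms => pvBOut (j0 + 3) ((j0, p0) :: ms)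

theorem pvAlt_eq (prefix_ : String) (products : List String) :
    searchByPrefix_alt prefix_ products =
      pvBDispatch ((pvEnum 0 products).filter (fun ip => PySem.Str.startswith ip.2 prefix_)) := by
  unfold searchByPrefix_alt pvBDispatch
  cases (pvEnum 0 products).filter (fun ip => PySem.Str.startswith ip.2 prefix_) with
  | nil => rfl
  | cons hd tl => cases hd; rfl

-- A's match test 'prefix == name[:len(prefix)]' is B's 'name.startswith(prefix)'
theorem pvCondEq (prefix_ name : String) :
    (prefix_ == PySem.Str.slice name none (some (PySem.Str.len prefix_))) =
      PySem.Str.startswith name prefix_ := by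
  rw [Bool.eq_iff_iff, beq_iff_eq, PySem.Str.startswith_eq, PySem.Chars.startswith_iff,
    List.prefix_iff_eq_take, ← String.toList_inj]
  simp [PySem.Str.toList_slice, PySem.Str.len_eq, PySem.List.slice_to_natCast]

-- A's second loop starting at j equals the filtered 3-window (when j ≤ length)
theorem pvAFold_eq (prefix_ : String) (products : List String) (j : Nat) (hj : j ≤ products.length) :
    (PySem.List.pyRange (j : Int) (min ((j : Int) + 3) (products.length : Int))).foldl
      (fun res i =>
        if prefix_ == PySem.Str.slice (PySem.List.pyGetD products i "") none (some (PySem.Str.len prefix_)) then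
          res ++ [PySem.List.pyGetD products i ""]
        else res) []
      = ((products.drop j).take 3).filter (fun p => PySem.Str.startswith p prefix_) := by
  simp only [pvCondEq]
  suffices h : ∀ (m j : Nat), j ≤ products.length →
      (PySem.List.pyRange (j : Int) (min ((j : Int) + (m : Int)) (products.length : Int))).foldl
        (fun res i =>
          if PySem.Str.startswith (PySem.List.pyGetD products i "") prefix_ then
            res ++ [PySem.List.pyGetD products i ""]
          else res) []
        = ((products.drop j).take m).filter (fun p => PySem.Str.startswith p prefix_) by
    have h3 := h 3 j hj
    norm_num at h3
    exact h3
  intro m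
  induction m with
  | zero =>
    intro j hj
    have h0 : min ((j : Int) + ((0 : Nat) : Int)) (products.length : Int) = (j : Int) := by
      push_cast; omega
    rw [h0]
    simp [PySem.List.pyRange]
  | succ m ih =>
    intro j hj
    rcases Nat.lt_or_ge j products.length with hlt | hge
    · have hmin : (j : Int) < min ((j : Int) + ((m + 1 : Nat) : Int)) (products.length : Int) := by
        push_cast; omega
      rw [PySem.List.pyRange_one_cons hmin, List.foldl_cons]
      have hget : PySem.List.pyGetD products (j : Int) "" = products[j] := by
        rw [PySem.List.pyGetD_eq_getElem products "" (by positivity) (by exact_mod_cast hlt)]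
        simp
      have hdrop : products.drop j = products[j] :: products.drop (j + 1) :=
        List.drop_eq_getElem_cons hlt
      have hm2 : min ((j : Int) + ((m + 1 : Nat) : Int)) (products.length : Int)
          = min (((j + 1 : Nat) : Int) + ((m : Nat) : Int)) (products.length : Int) := by
        push_cast; omega
      have hc1 : ((j : Int) + 1) = ((j + 1 : Nat) : Int) := by push_cast; omega
      have ih' := ih (j + 1) hlt
      rw [hget, hdrop, hc1, hm2, List.take_succ_cons, List.filter_cons]
      by_cases hp : PySem.Str.startswith products[j] prefix_
      · rw [if_pos hp, if_pos hp]
        rw [PySem.List.foldl_append_if (fun i => PySem.Str.startswith (PySem.List.pyGetD products i "") prefix_) (fun i => PySem.List.pyGetD products i "")] at ih' ⊢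
        simp only [List.nil_append, List.singleton_append] at ih' ⊢
        rw [ih']
      · rw [if_neg hp, if_neg hp]
        exact ih'
    · have hj' : j = products.length := le_antisymm hj hge
      have h0 : min ((j : Int) + ((m + 1 : Nat) : Int)) (products.length : Int) = (j : Int) := by
        push_cast; omega
      rw [h0]
      simp [PySem.List.pyRange, hj', List.drop_length]

-- B's bounded loop over the filtered enumeration is the filtered take of the underlying list
theorem pvBOut_filter (prefix_ : String) (l : List String) :
    ∀ (i b : Nat),
      pvBOut b ((pvEnum i l).filter (fun ip => PySem.Str.startswith ip.2 prefix_))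
        = (l.take (b - i)).filter (fun p => PySem.Str.startswith p prefix_) := by
  induction l with
  | nil => intro i b; simp [pvEnum, pvBOut]
  | cons x xs ih =>
    intro i b
    simp only [pvEnum, List.filter_cons]
    by_cases hb : b ≤ i
    · have hbi : b - i = 0 := by omega
      have hbi1 : b - (i + 1) = 0 := by omega
      by_cases hp : PySem.Str.startswith x prefix_
      · simp only [hp, if_pos, pvBOut, if_pos hb, hbi, List.take_zero, List.filter_nil]
      · have h1 := ih (i + 1) b
        rw [hbi1, List.take_zero, List.filter_nil] at h1
        simp only [hp, Bool.false_eq_true, if_false, hbi, List.take_zero, List.filter_nil]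
        exact h1
    · have hbi : b - i = (b - (i + 1)) + 1 := by omega
      by_cases hp : PySem.Str.startswith x prefix_
      · simp only [hp, if_pos, pvBOut, if_neg hb, hbi, List.take_succ_cons, List.filter_cons]
        rw [ih (i + 1) b]
      · simp only [hp, Bool.false_eq_true, if_false, hbi, List.take_succ_cons, List.filter_cons]
        rw [ih (i + 1) b]

-- main invariant: from position i (all earlier products failing the test), B's dispatch on the
-- filtered enumeration equals A's find-then-rescan
theorem pvMain (prefix_ : String) (products : List String) :
    ∀ (tail : List String) (i : Nat), products.drop i = tail →
      (∀ x ∈ products.take i, PySem.Str.startswith x prefix_ = false) →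
      pvBDispatch ((pvEnum i tail).filter (fun ip => PySem.Str.startswith ip.2 prefix_)) =
        (PySem.List.pyRange (pvAFind prefix_ (pvEnum i tail))
            (min ((pvAFind prefix_ (pvEnum i tail)) + 3) (products.length : Int))).foldl
          (fun res k =>
            if prefix_ == PySem.Str.slice (PySem.List.pyGetD products k "") none (some (PySem.Str.len prefix_)) then
              res ++ [PySem.List.pyGetD products k ""]
            else res) [] := by
  intro tail
  induction tail with
  | nil =>
    intro i hdrop hfail
    have hi : products.length ≤ i := List.drop_eq_nil_iff.mp hdrop
    simp only [pvEnum, pvAFind, List.filter_nil, pvBDispatch]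
    have hA := pvAFold_eq prefix_ products 0 (Nat.zero_le _)
    rw [Nat.cast_zero] at hA
    rw [hA, eq_comm, List.filter_eq_nil_iff]
    intro x hx
    have hxp : x ∈ products := List.mem_of_mem_take hx
    have htake : products.take i = products := List.take_of_length_le hi
    rw [← htake] at hxp
    rw [hfail x hxp]
    simp
  | cons name rest ih =>
    intro i hdrop hfail
    have hi : i < products.length := by
      by_contra hc
      rw [List.drop_eq_nil_of_le (Nat.le_of_not_lt hc)] at hdrop
      simp at hdrop
    have hname : products[i] = name := by
      have h2 := List.drop_eq_getElem_cons hi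
      rw [hdrop] at h2
      injection h2 with h1 _
      exact h1.symm
    simp only [pvEnum, pvAFind, List.filter_cons]
    rw [pvCondEq prefix_ name]
    by_cases hp : PySem.Str.startswith name prefix_
    · rw [if_pos hp]
      simp only [hp, if_pos]
      have hW := pvBOut_filter prefix_ (name :: rest) i (i + 3)
      simp only [pvEnum, List.filter_cons, hp, if_pos] at hW
      have hW' : pvBDispatch ((i, name) :: (pvEnum (i + 1) rest).filter (fun ip => PySem.Str.startswith ip.2 prefix_))
          = ((name :: rest).take (i + 3 - i)).filter (fun p => PySem.Str.startswith p prefix_) := by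
        unfold pvBDispatch
        exact hW
      rw [hW']
      have h3 : i + 3 - i = 3 := by omega
      rw [h3, ← hdrop]
      exact (pvAFold_eq prefix_ products i (Nat.le_of_lt hi)).symm
    · rw [if_neg hp]
      simp only [hp, Bool.false_eq_true, if_false]
      apply ih (i + 1)
      · have h3 := congrArg (List.drop 1) hdrop
        simpa [List.drop_drop, Nat.add_comm] using h3
      · intro x hx
        rw [List.take_add_one, List.getElem?_eq_getElem hi, hname] at hx
        simp only [Option.toList_some, List.mem_append, List.mem_singleton] at hx
        rcases hx with hx | hx
        · exact hfail x hx
        · rw [hx]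
          exact Bool.eq_false_iff.mpr hp

-- ===== VERDICT (by name: the statement is the Claim_ definition above) =====
theorem searchByPrefix_spec : Claim_equal_searchByPrefix := by
  intro prefix_ products _
  unfold Spec_searchByPrefix searchByPrefix
  rw [pvAlt_eq]
  exact (pvMain prefix_ products products 0 rfl (by simp)).symm
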